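-- pv_equiv track=rewrite | github.com/DutchFakeTuber/Advent_of_Code | 2015/Day 5/Day 5 - Doesn't He Have Intern-Elves For This.py | checkLetters
-- ===== SOURCE A (Python) =====
-- def checkLetters(line: str) -> bool:
--     even: list = [letter for letter in line[::2]]
--     odd: list = [letter for letter in line[1::2]]
--     for _e, e in zip(even[::], even[1::]):
--         if _e == e: return True
--     for _o, o in zip(odd[::], odd[1::]):
--         if _o == o: return True
--     return False
-- ===== SOURCE B (Python) =====
-- def checkLetters(line: str) -> bool:
--     return any(a == b for a, b in zip(line, line[2:]))
-- ===== Notes on version B (the rewrite author's own statement) =====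
-- stated objective: idiomatic
-- what changed: Instead of splitting the string into even- and odd-indexed sublists and scanning each pair of copies for adjacent equal letters, B does one pass zipping the string against itself shifted by two and asks any() for an equal pair.
import Mathlib
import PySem

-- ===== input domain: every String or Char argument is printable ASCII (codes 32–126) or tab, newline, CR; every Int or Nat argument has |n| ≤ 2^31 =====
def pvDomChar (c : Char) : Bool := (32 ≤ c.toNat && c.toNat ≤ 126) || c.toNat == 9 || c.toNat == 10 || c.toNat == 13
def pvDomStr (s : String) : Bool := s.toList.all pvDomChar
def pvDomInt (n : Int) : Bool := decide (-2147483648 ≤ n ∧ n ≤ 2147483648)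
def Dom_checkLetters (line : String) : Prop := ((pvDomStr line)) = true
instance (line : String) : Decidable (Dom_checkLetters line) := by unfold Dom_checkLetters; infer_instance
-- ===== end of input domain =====

-- B replaces A's even/odd subsequence split with a single zip of the string against
-- itself shifted by two (idiomatic, same cost); equivalence proved on all of Dom.

-- ===== PORT A =====
-- the `for _x, x in zip(.., ..): if _x == x: return True` loop
def pvLoopA : List (Char × Char) → Bool
  | [] => false
  | (x, y) :: rest => if x = y then true else pvLoopA rest

def checkLetters (line : String) : Bool :=
  -- line[::2] / line[1::2]; step 2 ≠ 0, so slice? always returns some — getD [] is never the default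
  let even : List Char := (PySem.List.slice? line.toList none none 2).getD []
  let odd : List Char := (PySem.List.slice? line.toList (some 1) none 2).getD []
  if pvLoopA ((PySem.List.slice even none none).zip (PySem.List.slice even (some 1) none)) then true
  else pvLoopA ((PySem.List.slice odd none none).zip (PySem.List.slice odd (some 1) none))

-- ===== PORT B =====
def checkLetters_alt (line : String) : Bool :=
  ((line.toList.zip (PySem.List.slice line.toList (some 2) none)).any (fun p => p.1 == p.2))

-- ===== PRECONDITION & SPEC =====
def Spec_checkLetters (line : String) (out : Bool) : Prop := out = checkLetters_alt line
instance (line : String) (out : Bool) : Decidable (Spec_checkLetters line out) := by unfold Spec_checkLetters; infer_instance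

-- ===== CLAIM (what is proved, stated in full; the proofs are below) =====
def Claim_equal_checkLetters : Prop := ∀ (line : String), Dom_checkLetters line → Spec_checkLetters line (checkLetters line)

-- ===== LEMMAS AND PROOFS =====

-- ===== VERDICT (by name: the statement is the Claim_ definition above) =====
-- every-other-element subsequence, as produced by a step-2 slice
def pvE {α : Type} : List α → List α
  | [] => []
  | [a] => [a]
  | a :: _ :: t => a :: pvE t

theorem pvE_of_filterMap {α : Type} (t : List α) (f : Nat → Option α)
    (hf : ∀ k, f k = t[2 * k]?) :
    List.filterMap f (List.range ((t.length + 1) / 2)) = pvE t := by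
  induction t using pvE.induct generalizing f with
  | case1 => simp [pvE]
  | case2 a =>
      simp [pvE, List.range_succ, List.filterMap, hf]
  | case3 a b r ih =>
      have hc : ((a :: b :: r).length + 1) / 2 = (r.length + 1) / 2 + 1 := by
        simp [List.length_cons]; omega
      have h0 : f 0 = some a := by rw [hf]; rfl
      rw [hc, List.range_succ_eq_map, List.filterMap_cons, h0]
      rw [show List.filterMap f (List.map Nat.succ (List.range ((r.length + 1) / 2)))
            = List.filterMap (f ∘ Nat.succ) (List.range ((r.length + 1) / 2)) from List.filterMap_map]
      rw [ih (f ∘ Nat.succ) ?_]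
      · simp [pvE]
      · intro k
        show f (k + 1) = r[2 * k]?
        rw [hf (k + 1), show 2 * (k + 1) = 2 * k + 1 + 1 from by omega]
        simp

theorem pv_slice2 {α : Type} (xs : List α) :
    PySem.List.slice? xs none none 2 = some (pvE xs) := by
  simp only [PySem.List.slice?, PySem.List.sliceIndices]
  norm_num
  rw [show (if 0 < xs.length then (((xs.length : Int) + 2 - 1) / 2).toNat else 0) = (xs.length + 1) / 2 from by split <;> omega]
  exact pvE_of_filterMap xs _ (by intro k; congr 1)

theorem pv_slice2_from1 {α : Type} (xs : List α) :
    PySem.List.slice? xs (some 1) none 2 = some (pvE xs.tail) := by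
  cases xs with
  | nil => simp [PySem.List.slice?, PySem.List.sliceIndices, pvE]
  | cons a t =>
      simp only [PySem.List.slice?, PySem.List.sliceIndices]
      norm_num
      rw [show (if 0 < t.length then (((t.length : Int) + 2 - 1) / 2).toNat else 0) = (t.length + 1) / 2 from by split <;> omega]
      exact pvE_of_filterMap t _ (by
        intro k
        rw [show (1 + 2 * (k : Int)).toNat = 2 * k + 1 from by omega]
        simp)

def pvAdj (l : List Char) : Bool := pvLoopA (l.zip l.tail)

theorem pvLoopA_cons (x y : Char) (r : List (Char × Char)) :
    pvLoopA ((x, y) :: r) = ((x == y) || pvLoopA r) := by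
  by_cases h : x = y <;> simp [pvLoopA, h]

theorem pvE_cons {α : Type} (c : α) (t : List α) : pvE (c :: t) = c :: pvE t.tail := by
  cases t <;> rfl

theorem pvMain (n : Nat) : ∀ l : List Char, l.length ≤ n →
    (l.zip (l.drop 2)).any (fun p => p.1 == p.2) = (pvAdj (pvE l) || pvAdj (pvE l.tail)) := by
  induction n with
  | zero =>
      intro l h
      have hl : l = [] := List.eq_nil_of_length_eq_zero (by omega)
      subst hl
      simp [pvE, pvAdj, pvLoopA]
  | succ n ih =>
      intro l hl
      match l with
      | [] => simp [pvE, pvAdj, pvLoopA]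
      | [a] => simp [pvE, pvAdj, pvLoopA]
      | [a, b] => simp [pvE, pvAdj, pvLoopA]
      | a :: b :: c :: t =>
          have ih' := ih (b :: c :: t) (by simp at hl ⊢; omega)
          simp only [List.drop_succ_cons, List.drop_zero] at ih' ⊢
          rw [List.zip_cons_cons, List.any_cons, ih']
          simp only [pvE_cons, List.tail_cons, pvAdj, List.zip_cons_cons,
            pvLoopA_cons]
          simp [Bool.or_comm, Bool.or_left_comm]

theorem checkLetters_spec : Claim_equal_checkLetters := by
  intro line _
  unfold Spec_checkLetters checkLetters checkLetters_alt
  rw [pv_slice2, pv_slice2_from1]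
  simp only [Option.getD_some, PySem.List.slice_none_none, PySem.List.slice_from_one]
  rw [PySem.List.slice_from (ha := by norm_num)]
  have hm := pvMain line.toList.length line.toList le_rfl
  simp only [pvAdj] at hm
  rw [show ((2 : Int).toNat) = 2 from rfl, hm]
  cases pvLoopA ((pvE line.toList).zip (pvE line.toList).tail) <;> simp
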